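-- pv_equiv track=rewrite | github.com/Pichardescu/yang-mills-s3-computations | yang_mills_s3/geometry/poincare_homology.py | molien_series_coefficients
-- ===== SOURCE A (Python) =====
-- def molien_series_coefficients(l_max: int = 60) -> list[int]:
--     """
--     Compute Molien series coefficients from the closed-form generating function.
--
--     M(t) = (1 - t^60) / ((1 - t^12)(1 - t^20)(1 - t^30))
--
--     The degrees 12, 20, 30 are the Klein invariant polynomial degrees.
--     The t^60 correction is the syzygy relation.
--
--     Returns
--     -------
--     list : m_molien[l] for l = 0, ..., l_max
--     """
--     molien = [0] * (l_max + 1)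
--     for l in range(l_max + 1):
--         rhs = 0
--         if l == 0:
--             rhs = 1
--         if l == 60:
--             rhs = -1
--
--         val = rhs
--         if l >= 12:
--             val += molien[l - 12]
--         if l >= 20:
--             val += molien[l - 20]
--         if l >= 30:
--             val += molien[l - 30]
--         if l >= 32:
--             val -= molien[l - 32]
--         if l >= 42:
--             val -= molien[l - 42]
--         if l >= 50:
--             val -= molien[l - 50]
--         if l >= 62:
--             val += molien[l - 62]
--
--         molien[l] = val
--     return molien
-- ===== SOURCE B (Python) =====
-- def molien_series_coefficients(l_max: int = 60) -> list[int]: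
--     """Coin-change DP: convolve 1/(1-t^12)(1-t^20)(1-t^30) up to degree l_max,
--     then apply the (1 - t^60) syzygy correction."""
--     if l_max < 0:
--         return []
--     count = [0] * (l_max + 1)
--     count[0] = 1
--     for d in (12, 20, 30):
--         for i in range(d, l_max + 1):
--             count[i] += count[i - d]
--     return [count[l] - (count[l - 60] if l >= 60 else 0) for l in range(l_max + 1)]
-- ===== Notes on version B (the rewrite author's own statement) =====
-- stated objective: alternative
-- what changed: B replaces A's single backward seven-term recurrence (from the expanded denominator polynomial) by a coin-change DP: one in-place convolution pass per invariant degree, counting lattice representations, followed by the syzygy subtraction.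
import Mathlib
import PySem

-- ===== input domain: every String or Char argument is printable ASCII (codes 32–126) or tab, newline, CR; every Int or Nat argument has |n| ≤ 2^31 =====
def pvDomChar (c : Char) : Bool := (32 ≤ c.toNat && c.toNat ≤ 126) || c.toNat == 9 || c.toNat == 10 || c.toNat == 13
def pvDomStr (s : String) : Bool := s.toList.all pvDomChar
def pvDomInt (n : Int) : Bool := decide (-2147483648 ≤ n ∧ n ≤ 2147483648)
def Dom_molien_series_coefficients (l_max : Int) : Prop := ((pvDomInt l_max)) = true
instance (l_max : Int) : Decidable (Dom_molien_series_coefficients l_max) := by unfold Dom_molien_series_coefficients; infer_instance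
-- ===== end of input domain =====

-- B computes the same coefficients by a coin-change DP (three convolution passes for degrees
-- 12, 20, 30, then the t^60 syzygy subtraction) instead of A's backward 7-term recurrence.

-- ===== PORT A =====
-- loop body of A's `for l in range(l_max + 1)` (named helper; the lets follow A's statements)
def pvStepA (molien : List Int) (l : Int) : List Int :=
  let rhs : Int := 0
  let rhs := if l = 0 then 1 else rhs
  let rhs := if l = 60 then -1 else rhs
  let val := rhs
  let val := if 12 ≤ l then val + PySem.List.pyGetD molien (l - 12) 0 else val
  let val := if 20 ≤ l then val + PySem.List.pyGetD molien (l - 20) 0 else val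
  let val := if 30 ≤ l then val + PySem.List.pyGetD molien (l - 30) 0 else val
  let val := if 32 ≤ l then val - PySem.List.pyGetD molien (l - 32) 0 else val
  let val := if 42 ≤ l then val - PySem.List.pyGetD molien (l - 42) 0 else val
  let val := if 50 ≤ l then val - PySem.List.pyGetD molien (l - 50) 0 else val
  let val := if 62 ≤ l then val + PySem.List.pyGetD molien (l - 62) 0 else val
  PySem.List.pySetD molien l val

def molien_series_coefficients (l_max : Int) : List Int :=
  let molien : List Int := List.replicate (l_max + 1).toNat 0
  (PySem.List.pyRange 0 (l_max + 1) 1).foldl pvStepA molien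

-- ===== PORT B =====
-- inner loop body of B's `for i in range(d, l_max + 1)`: count[i] += count[i-d]
def pvStepB (d : Int) (c : List Int) (i : Int) : List Int :=
  PySem.List.pySetD c i (PySem.List.pyGetD c i 0 + PySem.List.pyGetD c (i - d) 0)

def molien_series_coefficients_alt (l_max : Int) : List Int :=
  if l_max < 0 then []
  else
    let count : List Int := PySem.List.pySetD (List.replicate (l_max + 1).toNat 0) 0 1
    let count := ([12, 20, 30] : List Int).foldl
      (fun c d => (PySem.List.pyRange d (l_max + 1) 1).foldl (pvStepB d) c) count
    (PySem.List.pyRange 0 (l_max + 1) 1).map (fun l =>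
      PySem.List.pyGetD count l 0 -
        (if 60 ≤ l then PySem.List.pyGetD count (l - 60) 0 else 0))

-- ===== PRECONDITION & SPEC =====
def Spec_molien_series_coefficients (l_max : Int) (out : List Int) : Prop := out = molien_series_coefficients_alt l_max
instance (l_max : Int) (out : List Int) : Decidable (Spec_molien_series_coefficients l_max out) := by unfold Spec_molien_series_coefficients; infer_instance

-- ===== CLAIM (what is proved, stated in full; the proofs are below) =====
def Claim_equal_molien_series_coefficients : Prop := ∀ (l_max : Int), Dom_molien_series_coefficients l_max → Spec_molien_series_coefficients l_max (molien_series_coefficients l_max)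

-- ===== LEMMAS AND PROOFS =====

-- the Kronecker delta: coefficient series of 1
def pvDelta (l : Int) : Int := if l = 0 then 1 else 0

-- pvDiv d f = coefficient series of F(t)/(1 - t^d): g l = f l + g (l - d), zero for l < 0
def pvDiv (d : Nat) (f : Int → Int) (l : Int) : Int :=
  if _h : l < 0 ∨ d = 0 then 0 else f l + pvDiv d f (l - d)
termination_by (l + 1).toNat
decreasing_by omega

def pvA1 : Int → Int := pvDiv 12 pvDelta
def pvA2 : Int → Int := pvDiv 20 pvA1
def pvA3 : Int → Int := pvDiv 30 pvA2

-- pvN = A's recurrence, as a function of the degree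
def pvN (l : Int) : Int :=
  if h : l < 0 then 0 else
    (if l = 60 then -1 else if l = 0 then 1 else 0)
    + pvN (l - 12) + pvN (l - 20) + pvN (l - 30)
    - pvN (l - 32) - pvN (l - 42) - pvN (l - 50) + pvN (l - 62)
termination_by (l + 1).toNat
decreasing_by all_goals omega

lemma pvDiv_neg (d : Nat) (f : Int → Int) (l : Int) (h : l < 0) : pvDiv d f l = 0 := by
  rw [pvDiv]; simp [h]

lemma pvN_neg (l : Int) (h : l < 0) : pvN l = 0 := by
  rw [pvN]; simp [h]

lemma pvA3_neg (l : Int) (h : l < 0) : pvA3 l = 0 := pvDiv_neg 30 pvA2 l h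

lemma pvDiv_step (d : Nat) (hd : d ≠ 0) (f : Int → Int) (hf : ∀ l, l < 0 → f l = 0)
    (l : Int) : pvDiv d f l - pvDiv d f (l - d) = f l := by
  by_cases h : l < 0
  · rw [pvDiv_neg d f l h, pvDiv_neg d f _ (by omega), hf l h]; ring
  · conv_lhs => rw [pvDiv]
    rw [dif_neg (by omega : ¬ (l < 0 ∨ d = 0))]; ring

lemma pvA1_step (l : Int) : pvA1 l - pvA1 (l - 12) = pvDelta l :=
  pvDiv_step 12 (by omega) pvDelta (fun l hneg => by simp [pvDelta]; omega) l

lemma pvA2_step (l : Int) : pvA2 l - pvA2 (l - 20) = pvA1 l :=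
  pvDiv_step 20 (by omega) pvA1 (fun l h => pvDiv_neg _ _ _ h) l

lemma pvA3_step (l : Int) : pvA3 l - pvA3 (l - 30) = pvA2 l :=
  pvDiv_step 30 (by omega) pvA2 (fun l h => pvDiv_neg _ _ _ h) l

-- the expanded denominator identity: (1-t^12)(1-t^20)(1-t^30) applied to pvA3 gives delta
lemma pvE (l : Int) :
    pvA3 l - pvA3 (l - 12) - pvA3 (l - 20) - pvA3 (l - 30)
      + pvA3 (l - 32) + pvA3 (l - 42) + pvA3 (l - 50) - pvA3 (l - 62) = pvDelta l := by
  have h3a := pvA3_step l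
  have h3b := pvA3_step (l - 12)
  have h3c := pvA3_step (l - 20)
  have h3d := pvA3_step (l - 32)
  rw [(by ring : l - 12 - 30 = l - 42)] at h3b
  rw [(by ring : l - 20 - 30 = l - 50)] at h3c
  rw [(by ring : l - 32 - 30 = l - 62)] at h3d
  have h2a := pvA2_step l
  have h2b := pvA2_step (l - 12)
  rw [(by ring : l - 12 - 20 = l - 32)] at h2b
  have h1 := pvA1_step l
  linarith

-- main bridge: A's recurrence equals the counting series with the t^60 correction
lemma pvN_eq_aux : ∀ n : Nat, ∀ l : Int, (l + 1).toNat ≤ n → pvN l = pvA3 l - pvA3 (l - 60) := by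
  intro n
  induction n with
  | zero =>
    intro l hl
    have h : l < 0 := by omega
    rw [pvN_neg l h, pvA3_neg l h, pvA3_neg (l - 60) (by omega)]; ring
  | succ n ih =>
    intro l hl
    by_cases h : l < 0
    · rw [pvN_neg l h, pvA3_neg l h, pvA3_neg (l - 60) (by omega)]; ring
    · rw [pvN, dif_neg h]
      rw [ih (l - 12) (by omega), ih (l - 20) (by omega), ih (l - 30) (by omega),
          ih (l - 32) (by omega), ih (l - 42) (by omega), ih (l - 50) (by omega),
          ih (l - 62) (by omega)]
      have E1 := pvE l
      have E2 := pvE (l - 60)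
      rw [(by ring : l - 60 - 12 = l - 12 - 60), (by ring : l - 60 - 20 = l - 20 - 60),
          (by ring : l - 60 - 30 = l - 30 - 60), (by ring : l - 60 - 32 = l - 32 - 60),
          (by ring : l - 60 - 42 = l - 42 - 60), (by ring : l - 60 - 50 = l - 50 - 60),
          (by ring : l - 60 - 62 = l - 62 - 60)] at E2
      have hrhs : (if l = 60 then (-1 : Int) else if l = 0 then 1 else 0)
          = pvDelta l - pvDelta (l - 60) := by
        simp only [pvDelta]; split_ifs <;> omega
      rw [hrhs]
      linarith

lemma pvN_eq (l : Int) : pvN l = pvA3 l - pvA3 (l - 60) := pvN_eq_aux _ l le_rfl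

-- evaluating A's loop body on the invariant state
lemma stepA_eval (n k : Nat) (hk : k < n) :
    pvStepA ((List.range n).map (fun i => if i < k then pvN i else 0)) (k : Int)
      = (List.range n).map (fun i => if i < k + 1 then pvN i else 0) := by
  set ms := (List.range n).map (fun i => if i < k then pvN (i : Int) else 0) with hms
  have hlen : ms.length = n := by simp [hms]
  have hget : ∀ j : Int, 0 ≤ j → j < (k : Int) → PySem.List.pyGetD ms j 0 = pvN j := by
    intro j h0 hj
    rw [PySem.List.pyGetD_eq_getElem ms 0 h0 (by simp only [hlen]; omega)]
    simp only [hms, List.getElem_map, List.getElem_range]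
    rw [if_pos (by omega), Int.toNat_of_nonneg h0]
  have hadd : ∀ dd : Int, 0 < dd → ∀ v : Int,
      (if dd ≤ (k : Int) then v + PySem.List.pyGetD ms ((k : Int) - dd) 0 else v)
        = v + pvN ((k : Int) - dd) := by
    intro dd hdd v
    by_cases hc : dd ≤ (k : Int)
    · rw [if_pos hc, hget _ (by omega) (by omega)]
    · rw [if_neg hc, pvN_neg _ (by omega)]; ring
  have hsub : ∀ dd : Int, 0 < dd → ∀ v : Int,
      (if dd ≤ (k : Int) then v - PySem.List.pyGetD ms ((k : Int) - dd) 0 else v)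
        = v - pvN ((k : Int) - dd) := by
    intro dd hdd v
    by_cases hc : dd ≤ (k : Int)
    · rw [if_pos hc, hget _ (by omega) (by omega)]
    · rw [if_neg hc, pvN_neg _ (by omega)]; ring
  show PySem.List.pySetD ms (k : Int) _ = _
  rw [hadd 12 (by omega), hadd 20 (by omega), hadd 30 (by omega), hsub 32 (by omega),
      hsub 42 (by omega), hsub 50 (by omega), hadd 62 (by omega)]
  have hval : (if (k : Int) = 60 then (-1 : Int) else if (k : Int) = 0 then 1 else 0)
      + pvN ((k : Int) - 12) + pvN ((k : Int) - 20) + pvN ((k : Int) - 30)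
      - pvN ((k : Int) - 32) - pvN ((k : Int) - 42) - pvN ((k : Int) - 50)
      + pvN ((k : Int) - 62) = pvN (k : Int) := by
    conv_rhs => rw [pvN]
    rw [dif_neg (by omega : ¬ ((k : Int) < 0))]
  rw [hval, PySem.List.pySetD_natCast]
  apply List.ext_getElem
  · simp [hms]
  · intro j h1 h2
    simp only [hms, List.getElem_set, List.getElem_map, List.getElem_range]
    by_cases hjk : k = j
    · subst hjk; rw [if_pos rfl, if_pos (by omega)]
    · rw [if_neg hjk]
      by_cases hjk1 : j < k
      · rw [if_pos hjk1, if_pos (by omega)]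
      · rw [if_neg hjk1, if_neg (by omega)]

-- A's loop invariant
lemma loopA_inv (n : Nat) : ∀ k : Nat, k ≤ n →
    (PySem.List.pyRange 0 (k : Int) 1).foldl pvStepA (List.replicate n (0 : Int))
      = (List.range n).map (fun i => if i < k then pvN i else 0) := by
  intro k
  induction k with
  | zero =>
    intro _
    rw [PySem.List.pyRange_one_eq_nil (by omega)]
    apply List.ext_getElem
    · simp
    · intro j h1 h2; simp
  | succ k ih =>
    intro hk
    have hcast : ((k + 1 : Nat) : Int) = (k : Int) + 1 := by push_cast; ring
    rw [hcast, PySem.List.pyRange_one_succ_right (by omega),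
        List.foldl_append, ih (by omega)]
    simpa using stepA_eval n k (by omega)

-- evaluating B's inner-loop body on the invariant state
lemma stepB_eval (d n k : Nat) (hd : 0 < d) (hdk : d ≤ k) (hk : k < n) (f : Int → Int) :
    pvStepB (d : Int) ((List.range n).map (fun i => if i < k then pvDiv d f i else f i)) (k : Int)
      = (List.range n).map (fun i => if i < k + 1 then pvDiv d f i else f i) := by
  set ms := (List.range n).map (fun i => if i < k then pvDiv d f (i : Int) else f i) with hms
  have hlen : ms.length = n := by simp [hms]
  have hget : ∀ j : Nat, j < n → PySem.List.pyGetD ms (j : Int) 0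
      = (if j < k then pvDiv d f j else f j) := by
    intro j hj
    rw [PySem.List.pyGetD_eq_getElem ms 0 (by omega) (by simp only [hlen]; omega)]
    simp only [hms, Int.toNat_natCast, List.getElem_map, List.getElem_range]
  have hgetk : PySem.List.pyGetD ms (k : Int) 0 = f k := by
    rw [hget k hk, if_neg (by omega)]
  have hgetkd : PySem.List.pyGetD ms ((k : Int) - (d : Int)) 0 = pvDiv d f ((k : Int) - (d : Int)) := by
    have hcast : ((k : Int) - (d : Int)) = ((k - d : Nat) : Int) := by omega
    rw [hcast, hget (k - d) (by omega), if_pos (by omega)]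
  show PySem.List.pySetD ms (k : Int) _ = _
  rw [hgetk, hgetkd]
  have hval : f (k : Int) + pvDiv d f ((k : Int) - (d : Int)) = pvDiv d f (k : Int) := by
    conv_rhs => rw [pvDiv]
    rw [dif_neg (by omega : ¬ ((k : Int) < 0 ∨ d = 0))]
  rw [hval, PySem.List.pySetD_natCast]
  apply List.ext_getElem
  · simp [hms]
  · intro j h1 h2
    simp only [hms, List.getElem_set, List.getElem_map, List.getElem_range]
    by_cases hjk : k = j
    · subst hjk; rw [if_pos rfl, if_pos (by omega)]
    · rw [if_neg hjk]
      by_cases hjk1 : j < k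
      · rw [if_pos hjk1, if_pos (by omega)]
      · rw [if_neg hjk1, if_neg (by omega)]

-- B's pass invariant
lemma passB (d : Nat) (hd : 0 < d) (n : Nat) (f : Int → Int) :
    (PySem.List.pyRange (d : Int) (n : Int) 1).foldl (pvStepB (d : Int))
        ((List.range n).map (fun i : Nat => f (i : Int)))
      = (List.range n).map (fun i : Nat => pvDiv d f (i : Int)) := by
  have key : ∀ k : Nat, k ≤ n →
      (PySem.List.pyRange (d : Int) (k : Int) 1).foldl (pvStepB (d : Int))
          ((List.range n).map (fun i : Nat => f (i : Int)))
        = (List.range n).map (fun i => if i < k then pvDiv d f i else f i) := by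
    intro k
    induction k with
    | zero =>
      intro _
      rw [PySem.List.pyRange_one_eq_nil (by omega)]
      simp only [List.foldl_nil]
      apply List.map_congr_left
      intro i _; rw [if_neg (by omega)]
    | succ k ih =>
      intro hk
      have hcast : ((k + 1 : Nat) : Int) = (k : Int) + 1 := by push_cast; ring
      by_cases hdk : d ≤ k
      · rw [hcast, PySem.List.pyRange_one_succ_right (by omega : (d : Int) ≤ (k : Int)),
            List.foldl_append, ih (by omega)]
        simpa using stepB_eval d n k hd hdk (by omega) f
      · rw [hcast, PySem.List.pyRange_one_eq_nil (by omega : (k : Int) + 1 ≤ (d : Int))]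
        rw [PySem.List.pyRange_one_eq_nil (by omega : (k : Int) ≤ (d : Int))] at ih
        rw [ih (by omega)]
        apply List.map_congr_left
        intro i hi
        by_cases hik : i < k
        · rw [if_pos hik, if_pos (by omega)]
        · by_cases hik1 : i < k + 1
          · rw [if_neg hik, if_pos hik1]
            have hikd : i = k := by omega
            subst hikd
            rw [pvDiv, dif_neg (by omega : ¬ ((i : Int) < 0 ∨ d = 0)),
                pvDiv_neg d f _ (by omega)]
            ring
          · rw [if_neg hik, if_neg hik1]
  have hn := key n le_rfl
  rw [hn]
  apply List.map_congr_left
  intro i hi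
  rw [if_pos (by simp at hi; omega)]

-- A's result, characterised
lemma A_eq (l_max : Int) (h : ¬ l_max < 0) :
    molien_series_coefficients l_max
      = (List.range (l_max + 1).toNat).map (fun i : Nat => pvN (i : Int)) := by
  unfold molien_series_coefficients
  set n := (l_max + 1).toNat with hndef
  have hcast : ((n : Nat) : Int) = l_max + 1 := by omega
  rw [show PySem.List.pyRange 0 (l_max + 1) 1
        = PySem.List.pyRange 0 ((n : Nat) : Int) 1 from by rw [hcast]]
  rw [loopA_inv n n le_rfl]
  apply List.map_congr_left
  intro i hi
  rw [if_pos (by simp at hi; omega)]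

-- B's result, characterised
lemma B_eq (l_max : Int) (h : ¬ l_max < 0) :
    molien_series_coefficients_alt l_max
      = (List.range (l_max + 1).toNat).map (fun i : Nat => pvN (i : Int)) := by
  unfold molien_series_coefficients_alt
  rw [if_neg h]
  set n := (l_max + 1).toNat with hndef
  have hcast : ((n : Nat) : Int) = l_max + 1 := by omega
  simp only [List.foldl_cons, List.foldl_nil]
  have hc0 : PySem.List.pySetD (List.replicate n (0 : Int)) 0 1
      = (List.range n).map (fun i : Nat => pvDelta (i : Int)) := by
    rw [show (0 : Int) = ((0 : Nat) : Int) from by norm_num, PySem.List.pySetD_natCast]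
    apply List.ext_getElem
    · simp
    · intro j h1 h2
      simp only [List.getElem_set, List.getElem_map, List.getElem_range,
        List.getElem_replicate, pvDelta]
      split_ifs <;> omega
  rw [hc0]
  have p1 := passB 12 (by norm_num) n pvDelta
  have p2 := passB 20 (by norm_num) n pvA1
  have p3 := passB 30 (by norm_num) n pvA2
  simp only [Nat.cast_ofNat] at p1 p2 p3
  rw [← hcast, p1,
      show (fun i : Nat => pvDiv 12 pvDelta (i : Int)) = (fun i : Nat => pvA1 (i : Int)) from rfl,
      p2,
      show (fun i : Nat => pvDiv 20 pvA1 (i : Int)) = (fun i : Nat => pvA2 (i : Int)) from rfl,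
      p3,
      show (fun i : Nat => pvDiv 30 pvA2 (i : Int)) = (fun i : Nat => pvA3 (i : Int)) from rfl]
  rw [PySem.List.pyRange_zero_natCast, List.map_map]
  apply List.map_congr_left
  intro i hi
  have hi' : i < n := by simpa using hi
  simp only [Function.comp]
  have hlen : ((List.range n).map (fun j : Nat => pvA3 (j : Int))).length = n := by simp
  have g1 : PySem.List.pyGetD ((List.range n).map (fun j : Nat => pvA3 (j : Int))) (i : Int) 0
      = pvA3 (i : Int) := by
    rw [PySem.List.pyGetD_eq_getElem _ 0 (by omega) (by simp only [hlen]; omega)]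
    simp only [Int.toNat_natCast, List.getElem_map, List.getElem_range]
  rw [g1, pvN_eq]
  by_cases h60 : (60 : Int) ≤ (i : Int)
  · rw [if_pos h60]
    have g2 : PySem.List.pyGetD ((List.range n).map (fun j : Nat => pvA3 (j : Int)))
        ((i : Int) - 60) 0 = pvA3 ((i : Int) - 60) := by
      rw [PySem.List.pyGetD_eq_getElem _ 0 (by omega) (by simp only [hlen]; omega)]
      simp only [List.getElem_map, List.getElem_range]
      rw [show (((((i : Int) - 60).toNat : Nat)) : Int) = (i : Int) - 60 from by omega]
    rw [g2]
  · rw [if_neg h60, pvA3_neg ((i : Int) - 60) (by omega)]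

-- ===== VERDICT (by name: the statement is the Claim_ definition above) =====
theorem molien_series_coefficients_spec : Claim_equal_molien_series_coefficients := by
  intro l_max _
  unfold Spec_molien_series_coefficients
  by_cases hneg : l_max < 0
  · have hA : molien_series_coefficients l_max = [] := by
      unfold molien_series_coefficients
      rw [PySem.List.pyRange_one_eq_nil (by omega), show (l_max + 1).toNat = 0 from by omega]
      simp
    have hB : molien_series_coefficients_alt l_max = [] := by
      unfold molien_series_coefficients_alt
      rw [if_pos hneg]
    rw [hA, hB]
  · rw [A_eq l_max hneg, B_eq l_max hneg]
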